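-- pv_equiv track=rewrite | github.com/VenksamaM/TetrisAI | main.py | getBumpiness
-- ===== SOURCE A (Python) =====
-- def getBumpiness(board):
--     heights = []
--     bumpiness = 0
--
--     for column in range(len(board[0])):
--         nextHeight = 0
--         for row in range(3, len(board)):
--             if board[row][column] != 0:
--                 nextHeight = len(board) - row
--                 break
--         heights.append(nextHeight)
--     for i in range(len(heights) - 1):
--         bumpiness += abs(heights[i] - heights[i + 1])
--     return bumpiness
-- ===== SOURCE B (Python) =====
-- def getBumpiness(board):
--     # Layer decomposition: |h_i - h_{i+1}| equals the number of rows at which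
--     # exactly one of the two columns is already "started" (has a non-zero cell
--     # at or above that row, scanning from row 3).  So sweep rows top-down,
--     # maintain a cumulative occupancy mask, and at each row count adjacent
--     # mask mismatches; the grand total is the bumpiness.
--     n = len(board)
--     w = len(board[0])
--     occ = [False] * w
--     bumpiness = 0
--     for row in range(3, n):
--         for col in range(w):
--             if board[row][col] != 0:
--                 occ[col] = True
--         for i in range(w - 1):
--             if occ[i] != occ[i + 1]:
--                 bumpiness += 1
--     return bumpiness
-- ===== Notes on version B (the rewrite author's own statement) =====
-- stated objective: alternative
-- what changed: B replaces the heights-then-differences computation by a layer decomposition: it sweeps rows top-down once, maintains a cumulative per-column occupancy mask, and counts adjacent mask mismatches at every row; the total equals the sum of adjacent height differences, and no column height is ever computed.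
-- outside the precondition, e.g. on getBumpiness([[0, 0], [0, 0], [0, 0], [1, 1], [9]]): A returns 0, B raises IndexError
import Mathlib
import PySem

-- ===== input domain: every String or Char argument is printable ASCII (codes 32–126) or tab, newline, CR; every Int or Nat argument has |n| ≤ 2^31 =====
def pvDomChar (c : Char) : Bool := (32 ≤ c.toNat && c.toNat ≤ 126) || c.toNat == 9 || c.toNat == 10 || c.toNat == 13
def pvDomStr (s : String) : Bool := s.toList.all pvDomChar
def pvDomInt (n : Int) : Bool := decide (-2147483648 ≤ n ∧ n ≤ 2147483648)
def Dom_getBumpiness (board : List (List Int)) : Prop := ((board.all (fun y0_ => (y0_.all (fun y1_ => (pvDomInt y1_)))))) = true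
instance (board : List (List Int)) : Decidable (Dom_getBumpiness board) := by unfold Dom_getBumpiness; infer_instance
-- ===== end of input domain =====

-- B replaces A's heights-then-differences computation by a layer decomposition: one
-- top-down row sweep maintaining a cumulative per-column occupancy mask, counting
-- adjacent mask mismatches at every row; no column height is ever computed
-- (objective: alternative, same asymptotic cost).

-- ===== PORT A =====
-- board[row][col]: both indices are Nat and in range under Pre_, so getD is exact there.
def pvCell (board : List (List Int)) (row col : Nat) : Int :=
  (board.getD row []).getD col 0

-- inner loop of A: `for row in range(3, len(board)): if …: nextHeight = …; break`,
-- the break encoded by an Option accumulator that keeps its first `some`.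
def pvAColHeight (board : List (List Int)) (n : Nat) (col : Nat) : Int :=
  ((List.range' 3 (n - 3)).foldl
    (fun acc row =>
      match acc with
      | some h => some h
      | none => if pvCell board row col ≠ 0 then some ((n : Int) - row) else none)
    none).getD 0

def getBumpiness (board : List (List Int)) : Int :=
  let n := board.length
  let heights := (List.range (board.headD []).length).foldl
    (fun hs col => hs ++ [pvAColHeight board n col]) ([] : List Int)
  (List.range (heights.length - 1)).foldl
    (fun b i => b + |heights.getD i 0 - heights.getD (i + 1) 0|) 0

-- ===== PORT B =====
-- inner loops of B: `for col in range(w): if board[row][col] != 0: occ[col] = True`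
-- and `for i in range(w-1): if occ[i] != occ[i+1]: bumpiness += 1`.
def pvOccStep (board : List (List Int)) (row : Nat) (w : Nat) (occ : List Bool) : List Bool :=
  (List.range w).foldl
    (fun o col => if pvCell board row col ≠ 0 then o.set col true else o) occ

def pvPairCount (occ : List Bool) (w : Nat) : Int :=
  (List.range (w - 1)).foldl
    (fun b i => b + (if occ.getD i false ≠ occ.getD (i + 1) false then 1 else 0)) 0

-- outer loop of B over rows, state = (occupancy mask, running bumpiness).
def getBumpiness_alt (board : List (List Int)) : Int :=
  let n := board.length
  let w := (board.headD []).length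
  ((List.range' 3 (n - 3)).foldl
    (fun (st : List Bool × Int) row =>
      let occ := pvOccStep board row w st.1
      (occ, st.2 + pvPairCount occ w))
    (List.replicate w false, (0 : Int))).2

-- ===== PRECONDITION & SPEC =====
-- Pre_ excludes boards that are empty (Python A raises IndexError on board[0]) and boards
-- where some row past index 2 is shorter than row 0: there A generally raises IndexError,
-- and only returns when every column hits a non-zero cell before any short row; B's full
-- row sweep visits every cell of such a ragged board and raises IndexError itself.
def Pre_getBumpiness (board : List (List Int)) : Prop :=
  board ≠ [] ∧ ∀ r ∈ board.drop 3, (board.headD []).length ≤ r.length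
instance (board : List (List Int)) : Decidable (Pre_getBumpiness board) := by
  unfold Pre_getBumpiness; infer_instance
def pvWitness_getBumpiness : List (List Int) := [[0], [0], [0], [1]]
def Spec_getBumpiness (board : List (List Int)) (out : Int) : Prop := out = getBumpiness_alt board
instance (board : List (List Int)) (out : Int) : Decidable (Spec_getBumpiness board out) := by unfold Spec_getBumpiness; infer_instance

-- ===== CLAIM (what is proved, stated in full; the proofs are below) =====
def Claim_equal_getBumpiness : Prop := ∀ (board : List (List Int)), Dom_getBumpiness board → Pre_getBumpiness board → Spec_getBumpiness board (getBumpiness board)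

-- ===== LEMMAS AND PROOFS =====

-- the cumulative occupancy of column `col` after B has swept k rows
def pvAnyB (board : List (List Int)) (k col : Nat) : Bool :=
  (List.range' 3 k).any (fun r => decide (pvCell board r col ≠ 0))

-- length is preserved by B's inner set-fold
theorem pv_set_fold_length (P : Nat → Prop) [DecidablePred P] (l : List Nat) (o : List Bool) :
    (l.foldl (fun o col => if P col then o.set col true else o) o).length = o.length := by
  induction l generalizing o with
  | nil => rfl
  | cons a l ih => simp only [List.foldl_cons]; rw [ih]; split <;> simp

-- pointwise value of B's inner set-fold
theorem pv_set_fold_getD (P : Nat → Prop) [DecidablePred P] (l : List Nat) (o : List Bool)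
    (i : Nat) (hi : i < o.length) :
    (l.foldl (fun o col => if P col then o.set col true else o) o).getD i false
      = (o.getD i false || (decide (i ∈ l) && decide (P i))) := by
  induction l generalizing o with
  | nil => simp
  | cons a l ih =>
    simp only [List.foldl_cons]
    rw [ih]
    · by_cases hp : P a
      · by_cases hia : i = a
        · subst hia
          simp [hp, List.getD_eq_getElem?_getD, hi]
        · simp [hp, List.getD_eq_getElem?_getD, List.getElem?_set_ne (fun h => hia h.symm),
            List.mem_cons, hia]
      · simp [hp, List.mem_cons]
        by_cases hia : i = a
        · subst hia; simp [hp]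
        · simp [hia]
    · split <;> simpa using hi

-- one row of B's sweep turns the occupancy map for k rows into the one for k+1 rows
theorem pv_occStep_map (board : List (List Int)) (r w : Nat) (g : Nat → Bool) :
    pvOccStep board r w ((List.range w).map g)
      = (List.range w).map (fun i => g i || decide (pvCell board r i ≠ 0)) := by
  apply List.ext_getElem
  · rw [pvOccStep, pv_set_fold_length]; simp
  · intro i h1 h2
    have hlen : i < ((List.range w).map g).length := by simpa using h2
    have hiw : i < w := by simpa using h2
    have := pv_set_fold_getD (fun col => pvCell board r col ≠ 0) (List.range w)
      ((List.range w).map g) i hlen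
    rw [pvOccStep] at *
    have e1 : (List.foldl (fun o col => if pvCell board r col ≠ 0 then o.set col true else o)
        ((List.range w).map g) (List.range w)).getD i false
        = _ := this
    rw [List.getD_eq_getElem?_getD, List.getElem?_eq_getElem h1] at e1
    simp only [Option.getD_some] at e1
    show (List.foldl (fun o col => if pvCell board r col ≠ 0 then o.set col true else o)
        ((List.range w).map g) (List.range w))[i]'h1 = _
    rw [e1]
    simp [hiw]

theorem pv_anyB_succ (board : List (List Int)) (k col : Nat) :
    pvAnyB board (k+1) col = (pvAnyB board k col || decide (pvCell board (3+k) col ≠ 0)) := by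
  rw [pvAnyB, List.range'_1_concat, List.any_append, pvAnyB]
  simp

-- B's sweep after m rows: occupancy = pvAnyB m, accumulator = sum of per-row pair counts
theorem pv_B_invariant (board : List (List Int)) (w : Nat) (m : Nat) :
    (List.range' 3 m).foldl
      (fun (st : List Bool × Int) row =>
        let occ := pvOccStep board row w st.1
        (occ, st.2 + pvPairCount occ w))
      (List.replicate w false, (0 : Int))
    = ((List.range w).map (fun i => pvAnyB board m i),
       ∑ k ∈ Finset.range m, pvPairCount ((List.range w).map (fun i => pvAnyB board (k+1) i)) w) := by
  induction m with
  | zero => simp [pvAnyB, List.map_const']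
  | succ m ih =>
    rw [List.range'_1_concat, List.foldl_append, ih]
    simp only [List.foldl_cons, List.foldl_nil]
    rw [pv_occStep_map]
    have he : (fun i => pvAnyB board m i || decide (pvCell board (3+m) i ≠ 0))
        = fun i => pvAnyB board (m+1) i := by
      funext i; rw [pv_anyB_succ]
    rw [he, Finset.sum_range_succ]

-- pair count of a mapped mask as a Finset sum
theorem pv_pairCount_map (f : Nat → Bool) (w : Nat) :
    pvPairCount ((List.range w).map f) w
      = ∑ i ∈ Finset.range (w - 1), (if f i ≠ f (i+1) then (1:Int) else 0) := by
  rw [pvPairCount, PySem.List.foldl_add]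
  rw [show ∀ (l : List Int), (0:Int) + l.sum = l.sum from fun l => by ring_nf]
  have : ∀ i ∈ List.range (w-1),
      (if ((List.range w).map f).getD i false ≠ ((List.range w).map f).getD (i+1) false then (1:Int) else 0)
      = (if f i ≠ f (i+1) then (1:Int) else 0) := by
    intro i hi
    have h1 : i < w - 1 := List.mem_range.mp hi
    rw [PySem.List.getD_map_range f w i false (by omega),
        PySem.List.getD_map_range f w (i+1) false (by omega)]
  rw [List.map_congr_left this]
  rfl

-- counting layers with threshold k+1: the mismatch count is the height difference
theorem pv_count_abs' (m : Nat) (a b : Int) (ha0 : 0 ≤ a) (ham : a ≤ m) (hb0 : 0 ≤ b) (hbm : b ≤ m) :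
    ∑ k ∈ Finset.range m,
      (if (decide ((k:Int) + 1 ≤ a) ≠ decide ((k:Int) + 1 ≤ b)) then (1:Int) else 0) = |a - b| := by
  induction m generalizing a b with
  | zero =>
    have : a = 0 := by omega
    have : b = 0 := by omega
    simp_all
  | succ m ih =>
    rw [Finset.sum_range_succ]
    have hc : ∀ k ∈ Finset.range m,
        (if (decide ((k:Int) + 1 ≤ a) ≠ decide ((k:Int) + 1 ≤ b)) then (1:Int) else 0)
        = (if (decide ((k:Int) + 1 ≤ min a m) ≠ decide ((k:Int) + 1 ≤ min b m)) then (1:Int) else 0) := by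
      intro k hk
      have hk' : k < m := Finset.mem_range.mp hk
      have e1 : decide ((k:Int) + 1 ≤ a) = decide ((k:Int) + 1 ≤ min a m) := by
        apply decide_eq_decide.mpr; omega
      have e2 : decide ((k:Int) + 1 ≤ b) = decide ((k:Int) + 1 ≤ min b m) := by
        apply decide_eq_decide.mpr; omega
      rw [e1, e2]
    rw [Finset.sum_congr rfl hc, ih (min a m) (min b m) (by omega) (by omega) (by omega) (by omega)]
    rw [Int.abs_eq_natAbs, Int.abs_eq_natAbs]
    by_cases h1 : ((m:Int) + 1 ≤ a) <;> by_cases h2 : ((m:Int) + 1 ≤ b)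
    · rw [if_neg (by simp [h1, h2])]; omega
    · rw [if_pos (by simp [h1, h2])]; omega
    · rw [if_pos (by simp [h1, h2])]; omega
    · rw [if_neg (by simp [h1, h2])]; omega

-- the same count with threshold m - k (B sweeps top-down)
theorem pv_count_abs (m : Nat) (a b : Int) (ha0 : 0 ≤ a) (ham : a ≤ m) (hb0 : 0 ≤ b) (hbm : b ≤ m) :
    ∑ k ∈ Finset.range m,
      (if (decide ((m:Int) - k ≤ a) ≠ decide ((m:Int) - k ≤ b)) then (1:Int) else 0) = |a - b| := by
  rw [← pv_count_abs' m a b ha0 ham hb0 hbm, ← Finset.sum_range_reflect]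
  apply Finset.sum_congr rfl
  intro j hj
  have hj' : j < m := Finset.mem_range.mp hj
  have h3 : (m:Int) - ((m - 1 - j : Nat) : Int) = (j:Int) + 1 := by omega
  rw [h3]

-- A's break-fold keeps its first `some`.
theorem pv_foldl_keep_some (P : Nat → Prop) [DecidablePred P] (v : Nat → Int)
    (l : List Nat) (h : Int) :
    l.foldl
      (fun acc row =>
        match acc with
        | some h' => some h'
        | none => if P row then some (v row) else none) (some h) = some h := by
  induction l with
  | nil => rfl
  | cons a l ih => simpa using ih

-- A's break-fold is List.find? mapped through the value function.
theorem pv_fold_eq_find (P : Nat → Prop) [DecidablePred P] (v : Nat → Int) (l : List Nat) :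
    l.foldl
      (fun acc row =>
        match acc with
        | some h' => some h'
        | none => if P row then some (v row) else none) none
    = (l.find? (fun r => decide (P r))).map v := by
  induction l with
  | nil => rfl
  | cons a l ih =>
    by_cases hp : P a
    · simp [hp, pv_foldl_keep_some]
    · simpa [hp] using ih

theorem pv_height_eq_find (board : List (List Int)) (n col : Nat) :
    pvAColHeight board n col
      = (((List.range' 3 (n-3)).find? (fun r => decide (pvCell board r col ≠ 0))).map
          (fun r : Nat => (n:Int) - r)).getD 0 := by
  rw [pvAColHeight, pv_fold_eq_find]

-- each height lies in [0, n-3]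
theorem pv_height_bounds (board : List (List Int)) (n col : Nat) :
    0 ≤ pvAColHeight board n col ∧ pvAColHeight board n col ≤ ((n - 3 : Nat) : Int) := by
  rw [pv_height_eq_find]
  cases hf : (List.range' 3 (n-3)).find? (fun r => decide (pvCell board r col ≠ 0)) with
  | none => simp
  | some r =>
    have hm := List.mem_range'_1.mp (List.mem_of_find?_eq_some hf)
    simp only [Option.map_some, Option.getD_some]
    omega

-- bumpiness bridge: after K rows are swept (1 ≤ K ≤ n-3), a column is marked
-- occupied exactly when its A-height reaches the level of the last swept row.
theorem pv_bridge (board : List (List Int)) (n col K : Nat) (h1 : 1 ≤ K) (h2 : K ≤ n - 3) :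
    pvAnyB board K col = decide ((n:Int) - 2 - K ≤ pvAColHeight board n col) := by
  have hsplit : List.range' 3 (n-3) = List.range' 3 K ++ List.range' (3+K) (n-3-K) := by
    rw [List.range'_append_1]; congr 1; omega
  rw [pv_height_eq_find, hsplit, List.find?_append, pvAnyB, ← List.isSome_find?]
  cases hf : (List.range' 3 K).find? (fun r => decide (pvCell board r col ≠ 0)) with
  | some r =>
    have hm := List.mem_range'_1.mp (List.mem_of_find?_eq_some hf)
    simp only [Option.some_or, Option.isSome_some]
    have : (n:Int) - 2 - K ≤ (n:Int) - r := by omega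
    simp [this]
  | none =>
    simp only [Option.none_or, Option.isSome_none]
    cases hg : (List.range' (3+K) (n-3-K)).find? (fun r => decide (pvCell board r col ≠ 0)) with
    | some r =>
      have hm := List.mem_range'_1.mp (List.mem_of_find?_eq_some hg)
      simp only [Option.map_some, Option.getD_some]
      have : ¬ ((n:Int) - 2 - K ≤ (n:Int) - r) := by omega
      simp [this]
    | none =>
      simp only [Option.map_none, Option.getD_none]
      have : ¬ ((n:Int) - 2 - K ≤ (0:Int)) := by omega
      simp [this]

-- the assembly: A's sum of |adjacent height differences| = B's layered mismatch count
theorem pv_main (board : List (List Int)) : getBumpiness board = getBumpiness_alt board := by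
  unfold getBumpiness getBumpiness_alt
  simp only []
  set n := board.length with hn
  set w := (board.headD []).length with hw
  rw [PySem.List.foldl_append_singleton_eq_map]
  rw [pv_B_invariant]
  simp only [List.nil_append, List.length_map, List.length_range]
  have hA : (List.range (w - 1)).foldl
      (fun b i => b + |((List.range w).map (pvAColHeight board n)).getD i 0
        - ((List.range w).map (pvAColHeight board n)).getD (i + 1) 0|) 0
      = ∑ i ∈ Finset.range (w - 1),
          |pvAColHeight board n i - pvAColHeight board n (i + 1)| := by
    rw [PySem.List.foldl_add]
    have hc : ∀ i ∈ List.range (w - 1),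
        |((List.range w).map (pvAColHeight board n)).getD i 0
          - ((List.range w).map (pvAColHeight board n)).getD (i + 1) 0|
        = |pvAColHeight board n i - pvAColHeight board n (i + 1)| := by
      intro i hi
      have h1 : i < w - 1 := List.mem_range.mp hi
      rw [PySem.List.getD_map_range _ w i 0 (by omega),
          PySem.List.getD_map_range _ w (i+1) 0 (by omega)]
    rw [List.map_congr_left hc]
    show (0:Int) + _ = _
    rw [zero_add]
    rfl
  rw [hA]
  have hB : ∀ k, pvPairCount ((List.range w).map (fun i => pvAnyB board (k+1) i)) w
      = ∑ i ∈ Finset.range (w - 1),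
          (if pvAnyB board (k+1) i ≠ pvAnyB board (k+1) (i+1) then (1:Int) else 0) :=
    fun k => pv_pairCount_map _ w
  rw [Finset.sum_congr rfl (fun k _ => hB k), Finset.sum_comm]
  apply Finset.sum_congr rfl
  intro i _
  have hterm : ∀ k ∈ Finset.range (n - 3),
      (if pvAnyB board (k+1) i ≠ pvAnyB board (k+1) (i+1) then (1:Int) else 0)
      = (if (decide (((n-3 : Nat):Int) - k ≤ pvAColHeight board n i)
            ≠ decide (((n-3 : Nat):Int) - k ≤ pvAColHeight board n (i+1))) then (1:Int) else 0) := by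
    intro k hk
    have hk' : k < n - 3 := Finset.mem_range.mp hk
    rw [pv_bridge board n i (k+1) (by omega) (by omega),
        pv_bridge board n (i+1) (k+1) (by omega) (by omega)]
    have he : (n:Int) - 2 - ((k+1 : Nat) : Int) = ((n-3 : Nat):Int) - k := by omega
    rw [he]
  rw [Finset.sum_congr rfl hterm]
  exact (pv_count_abs (n - 3) _ _
    (pv_height_bounds board n i).1 (pv_height_bounds board n i).2
    (pv_height_bounds board n (i+1)).1 (pv_height_bounds board n (i+1)).2).symm

-- ===== VERDICT (by name: the statement is the Claim_ definition above) =====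
theorem getBumpiness_spec : Claim_equal_getBumpiness := by
  intro board _ _
  exact pv_main board
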